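-- pv_equiv track=rewrite | github.com/wlivengood/CodeWars | sum_pairs.py | sum_pairs
-- ===== SOURCE A (Python) =====
-- def sum_pairs(ints, s):
--     new_ints = []
--     [new_ints.append(int) for int in ints if new_ints.count(int) <2]
--     pairs = []
--     i_j_pairs = []
--     for i in range(len(new_ints)):
--         for j in range((i + 1), len(new_ints)):
--             if new_ints[i] + new_ints[j] == s:
--                 pairs.append([new_ints[i], new_ints[j]])
--                 i_j_pairs.append([i, j])
--     if pairs != []:
--         answer = pairs[0]
--         for k in range(len(pairs)):
--             if i_j_pairs[k][1] < i_j_pairs[pairs.index(answer)][1]: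
--                 answer = pairs[k]
--         return answer
--     else:
--         return None
-- ===== SOURCE B (Python) =====
-- def sum_pairs(ints, s):
--     seen = set()
--     for x in ints:
--         if s - x in seen:
--             return [s - x, x]
--         seen.add(x)
--     return None
-- ===== Notes on version B (the rewrite author's own statement) =====
-- stated objective: faster
-- what changed: A dedups the list (keeping at most 2 copies via repeated list.count), enumerates every i<j pair into parallel lists and then scans them (with a repeated pairs.index call) for the pair with the smallest second index; B is a single linear pass with a seen-set that returns the first pair completed, with a proof that A's keep-2 dedup and minimum-second-index selection always yield exactly that pair.
import Mathlib
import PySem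

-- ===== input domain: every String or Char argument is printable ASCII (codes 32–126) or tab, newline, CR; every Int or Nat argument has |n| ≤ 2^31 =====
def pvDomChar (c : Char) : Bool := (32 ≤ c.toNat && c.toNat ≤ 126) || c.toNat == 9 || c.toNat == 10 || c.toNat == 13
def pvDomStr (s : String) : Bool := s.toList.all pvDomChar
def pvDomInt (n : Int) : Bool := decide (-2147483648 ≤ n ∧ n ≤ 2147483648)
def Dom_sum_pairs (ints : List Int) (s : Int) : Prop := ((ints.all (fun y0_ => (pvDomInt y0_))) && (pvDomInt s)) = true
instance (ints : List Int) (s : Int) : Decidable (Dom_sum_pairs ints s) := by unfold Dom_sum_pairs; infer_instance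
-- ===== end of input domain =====

-- B replaces A's quadratic pair enumeration (after a keep-≤2 dedup) by a single linear pass with a
-- seen-set; the dedup is dropped entirely, proved here to never change the result. Objective: faster.

-- ===== PORT A =====
-- the comprehension '[new_ints.append(int) for int in ints if new_ints.count(int) < 2]'
def sum_pairs_keep2 (ints : List Int) : List Int :=
  ints.foldl (fun acc x => if PySem.List.count acc x < 2 then acc ++ [x] else acc) []

-- the pair-collecting double loop and the selection loop, run on new_ints
def sum_pairs_main (new_ints : List Int) (s : Int) : Option (List Int) :=
  let st :=
    (PySem.List.pyRange 0 (new_ints.length : Int)).foldl (fun st i =>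
      (PySem.List.pyRange (i + 1) (new_ints.length : Int)).foldl (fun st j =>
        if PySem.List.pyGetD new_ints i 0 + PySem.List.pyGetD new_ints j 0 = s then
          (st.1 ++ [[PySem.List.pyGetD new_ints i 0, PySem.List.pyGetD new_ints j 0]],
           st.2 ++ [[i, j]])
        else st) st)
      (([] : List (List Int)), ([] : List (List Int)))
  let pairs := st.1
  let i_j_pairs := st.2
  if pairs ≠ [] then
    -- pairs[0]; in-range because pairs ≠ [].  pairs.index(answer) never raises: answer ∈ pairs.
    let answer0 := PySem.List.pyGetD pairs 0 []
    some ((PySem.List.pyRange 0 (pairs.length : Int)).foldl (fun answer k =>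
      if PySem.List.pyGetD (PySem.List.pyGetD i_j_pairs k []) 1 0 <
         PySem.List.pyGetD (PySem.List.pyGetD i_j_pairs
           (((PySem.List.index? pairs answer).getD 0 : Nat) : Int) []) 1 0
      then PySem.List.pyGetD pairs k []
      else answer) answer0)
  else none

def sum_pairs (ints : List Int) (s : Int) : Option (List Int) :=
  sum_pairs_main (sum_pairs_keep2 ints) s

-- ===== PORT B =====
def sum_pairs_go (s : Int) : List Int → PySem.Set Int → Option (List Int)
  | [], _ => none
  | x :: rest, seen =>
    if PySem.Set.contains seen (s - x) then some [s - x, x]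
    else sum_pairs_go s rest (PySem.Set.add seen x)

def sum_pairs_alt (ints : List Int) (s : Int) : Option (List Int) :=
  sum_pairs_go s ints PySem.Set.empty

-- ===== PRECONDITION & SPEC =====
def Spec_sum_pairs (ints : List Int) (s : Int) (out : Option (List Int)) : Prop := out = sum_pairs_alt ints s
instance (ints : List Int) (s : Int) (out : Option (List Int)) : Decidable (Spec_sum_pairs ints s out) := by unfold Spec_sum_pairs; infer_instance

-- ===== CLAIM (what is proved, stated in full; the proofs are below) =====
def Claim_equal_sum_pairs : Prop := ∀ (ints : List Int) (s : Int), Dom_sum_pairs ints s → Spec_sum_pairs ints s (sum_pairs ints s)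

-- ===== LEMMAS AND PROOFS =====

-- reference scan: like sum_pairs_go but with the literal list prefix as the "seen" store
def pvScan (s : Int) : List Int → List Int → Option (List Int)
  | [], _ => none
  | x :: r, pre => if s - x ∈ pre then some [s - x, x] else pvScan s r (pre ++ [x])

-- the suffix that A's dedup keeps, given the already-kept prefix acc
def pvKeepRest : List Int → List Int → List Int
  | _, [] => []
  | acc, x :: r =>
    if PySem.List.count acc x < 2 then x :: pvKeepRest (acc ++ [x]) r else pvKeepRest acc r

-- "no two positions of acc sum to s", phrased on values
def pvNoPair (s : Int) (acc : List Int) : Prop :=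
  ∀ v ∈ acc, (s - v) ∈ acc → s - v = v ∧ acc.count v ≤ 1

-- the (i, j) index pairs A collects, in A's (lexicographic) order
def pvP (l : List Int) (s : Int) : List (Int × Int) :=
  (PySem.List.pyRange 0 (l.length : Int)).flatMap (fun i =>
    ((PySem.List.pyRange (i + 1) (l.length : Int)).filter
        (fun j => decide (PySem.List.pyGetD l i 0 + PySem.List.pyGetD l j 0 = s))).map
      (fun j => (i, j)))

def pvPairs (l : List Int) (s : Int) : List (List Int) :=
  (pvP l s).map (fun p => [PySem.List.pyGetD l p.1 0, PySem.List.pyGetD l p.2 0])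

def pvIjs (l : List Int) (s : Int) : List (List Int) :=
  (pvP l s).map (fun p => [p.1, p.2])

-- A's selection-loop body
def pvStep (l : List Int) (s : Int) (answer : List Int) (k : Int) : List Int :=
  if PySem.List.pyGetD (PySem.List.pyGetD (pvIjs l s) k []) 1 0 <
     PySem.List.pyGetD (PySem.List.pyGetD (pvIjs l s)
       (((PySem.List.index? (pvPairs l s) answer).getD 0 : Nat) : Int) []) 1 0
  then PySem.List.pyGetD (pvPairs l s) k [] else answer

lemma pv_double_inner (c : Int → Prop) [DecidablePred c] (v1 v2 : Int → List Int) :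
    ∀ (js : List Int) (st : List (List Int) × List (List Int)),
      js.foldl (fun st j => if c j then (st.1 ++ [v1 j], st.2 ++ [v2 j]) else st) st
      = (st.1 ++ (js.filter (fun j => decide (c j))).map v1,
         st.2 ++ (js.filter (fun j => decide (c j))).map v2) := by
  intro js
  induction js with
  | nil => intro st; simp
  | cons j js ih =>
    intro st
    by_cases h : c j
    · simp only [List.foldl_cons, if_pos h, ih, List.filter_cons, decide_eq_true h]
      simp
    · simp only [List.foldl_cons, if_neg h, ih, List.filter_cons, decide_eq_false h]
      simp

lemma pv_double (N : Int) (c : Int → Int → Prop) [inst : ∀ i j, Decidable (c i j)]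
    (v1 v2 : Int → Int → List Int) :
    ∀ (rs : List Int) (st : List (List Int) × List (List Int)),
      rs.foldl (fun st i =>
        (PySem.List.pyRange (i + 1) N).foldl (fun st j =>
          if c i j then (st.1 ++ [v1 i j], st.2 ++ [v2 i j]) else st) st) st
      = (st.1 ++ rs.flatMap (fun i =>
            ((PySem.List.pyRange (i + 1) N).filter (fun j => decide (c i j))).map (v1 i)),
         st.2 ++ rs.flatMap (fun i =>
            ((PySem.List.pyRange (i + 1) N).filter (fun j => decide (c i j))).map (v2 i))) := by
  intro rs
  induction rs with
  | nil => intro st; simp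
  | cons i rs ih =>
    intro st
    simp only [List.foldl_cons, pv_double_inner (c i) (v1 i) (v2 i), ih, List.flatMap_cons]
    simp [List.append_assoc]

lemma pv_st (l : List Int) (s : Int) :
    (PySem.List.pyRange 0 (l.length : Int)).foldl (fun st i =>
      (PySem.List.pyRange (i + 1) (l.length : Int)).foldl (fun st j =>
        if PySem.List.pyGetD l i 0 + PySem.List.pyGetD l j 0 = s then
          (st.1 ++ [[PySem.List.pyGetD l i 0, PySem.List.pyGetD l j 0]],
           st.2 ++ [[i, j]])
        else st) st)
      (([] : List (List Int)), ([] : List (List Int)))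
    = (pvPairs l s, pvIjs l s) := by
  rw [pv_double (l.length : Int)
      (fun i j => PySem.List.pyGetD l i 0 + PySem.List.pyGetD l j 0 = s)
      (fun i j => [PySem.List.pyGetD l i 0, PySem.List.pyGetD l j 0])
      (fun i j => [i, j])]
  simp [pvPairs, pvIjs, pvP, List.map_flatMap, List.map_map, Function.comp_def]

lemma pv_mem (l : List Int) (s : Int) (p : Int × Int) :
    p ∈ pvP l s ↔ 0 ≤ p.1 ∧ p.1 + 1 ≤ p.2 ∧ p.2 < (l.length : Int) ∧
      PySem.List.pyGetD l p.1 0 + PySem.List.pyGetD l p.2 0 = s := by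
  obtain ⟨i, j⟩ := p
  simp only [pvP, List.mem_flatMap, List.mem_map, List.mem_filter,
    PySem.List.mem_pyRange_one, decide_eq_true_eq]
  constructor
  · rintro ⟨i', ⟨hi0, hiN⟩, j', ⟨⟨hj1, hjN⟩, hsum⟩, heq⟩
    obtain ⟨rfl, rfl⟩ := Prod.mk.injEq .. ▸ heq
    exact ⟨hi0, hj1, hjN, hsum⟩
  · rintro ⟨h1, h2, h3, h4⟩
    exact ⟨i, ⟨h1, by omega⟩, j, ⟨⟨h2, h3⟩, h4⟩, rfl⟩

lemma pv_mem' (l : List Int) (s : Int) (i j : Int) :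
    (i, j) ∈ pvP l s ↔ 0 ≤ i ∧ i + 1 ≤ j ∧ j < (l.length : Int) ∧
      PySem.List.pyGetD l i 0 + PySem.List.pyGetD l j 0 = s := by
  simpa using pv_mem l s (i, j)

lemma pv_sorted (l : List Int) (s : Int) :
    (pvP l s).Pairwise (fun p q => p.1 < q.1 ∨ (p.1 = q.1 ∧ p.2 < q.2)) := by
  rw [pvP, List.pairwise_flatMap]
  constructor
  · intro i _hi
    rw [List.pairwise_map]
    exact ((PySem.List.pairwise_lt_pyRange_one (i + 1) (l.length : Int)).filter _).imp
      (fun h => Or.inr ⟨rfl, h⟩)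
  · refine (PySem.List.pairwise_lt_pyRange_one 0 (l.length : Int)).imp ?_
    intro a b hab x hx y hy
    simp only [List.mem_map] at hx hy
    obtain ⟨_, _, rfl⟩ := hx
    obtain ⟨_, _, rfl⟩ := hy
    exact Or.inl hab

lemma pv_pairs_getElem (l : List Int) (s : Int) (m : Nat) (hm : m < (pvP l s).length) :
    (pvPairs l s)[m]'(by simpa [pvPairs] using hm)
      = [PySem.List.pyGetD l ((pvP l s)[m]).1 0, PySem.List.pyGetD l ((pvP l s)[m]).2 0] := by
  simp [pvPairs]

lemma pv_index_le (l : List Int) (s : Int) (k : Nat) (hk : k < (pvP l s).length) :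
    ∃ m, ∃ hm : m < (pvP l s).length,
      PySem.List.index? (pvPairs l s) ((pvPairs l s)[k]'(by simpa [pvPairs] using hk))
        = some m ∧ ((pvP l s)[m]).2 ≤ ((pvP l s)[k]).2 := by
  have hk' : k < (pvPairs l s).length := by simpa [pvPairs] using hk
  have hvmem : (pvPairs l s)[k]'hk' ∈ pvPairs l s := List.getElem_mem hk'
  obtain ⟨m, hidx⟩ := Option.isSome_iff_exists.mp
    ((PySem.List.index?_isSome_iff (pvPairs l s) _).mpr hvmem)
  obtain ⟨hm', hmv, hfirst⟩ := PySem.List.getElem_of_index?_eq_some hidx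
  have hm : m < (pvP l s).length := by simpa [pvPairs] using hm'
  refine ⟨m, hm, hidx, ?_⟩
  have hmk : m ≤ k := by
    by_contra hmk
    exact hfirst k (by omega) rfl
  rcases Nat.lt_or_eq_of_le hmk with hlt | heq
  · have hlex := List.pairwise_iff_getElem.mp (pv_sorted l s) m k hm hk hlt
    rcases hlex with him | ⟨_, hj⟩
    swap
    · exact le_of_lt hj
    by_contra hjk
    rw [not_le] at hjk
    have hvals : PySem.List.pyGetD l ((pvP l s)[m]).1 0 = PySem.List.pyGetD l ((pvP l s)[k]).1 0 ∧
        PySem.List.pyGetD l ((pvP l s)[m]).2 0 = PySem.List.pyGetD l ((pvP l s)[k]).2 0 := by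
      have h2 := hmv
      rw [pv_pairs_getElem l s m hm, pv_pairs_getElem l s k hk] at h2
      simpa using h2
    have hmP := (pv_mem l s _).mp (List.getElem_mem hm)
    have hkP := (pv_mem l s _).mp (List.getElem_mem hk)
    have hqmem : (((pvP l s)[m]).1, ((pvP l s)[k]).2) ∈ pvP l s := by
      rw [pv_mem]
      refine ⟨hmP.1, by simp; omega, hkP.2.2.1, ?_⟩
      simpa [hvals.1] using hkP.2.2.2
    obtain ⟨mq, hmq, hPq⟩ := List.getElem_of_mem hqmem
    have hmq' : mq < (pvPairs l s).length := by simpa [pvPairs] using hmq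
    have hpq : (pvPairs l s)[mq]'hmq' = (pvPairs l s)[k]'hk' := by
      rw [pv_pairs_getElem l s mq hmq, pv_pairs_getElem l s k hk, hPq]
      simp [hvals.1]
    have hmmq : m ≤ mq := by
      by_contra hmmq
      exact hfirst mq (by omega) hpq
    rcases Nat.lt_or_eq_of_le hmmq with hlt2 | heq2
    · have hlex2 := List.pairwise_iff_getElem.mp (pv_sorted l s) m mq hm hmq hlt2
      rw [hPq] at hlex2
      rcases hlex2 with h1 | ⟨_, h2⟩
      · simp at h1
      · simp only [] at h2
        exact absurd h2 (not_lt.mpr (le_of_lt hjk))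
    · subst heq2
      have h3 := congrArg Prod.snd hPq
      simp only [] at h3
      exact absurd h3 (ne_of_gt hjk)
  · exact heq ▸ le_refl _

lemma pv_ijs_at (l : List Int) (s : Int) (m : Nat) (hm : m < (pvP l s).length) :
    PySem.List.pyGetD (PySem.List.pyGetD (pvIjs l s) (m : Int) []) 1 0 = ((pvP l s)[m]).2 := by
  have hm' : m < (pvIjs l s).length := by simpa [pvIjs] using hm
  rw [PySem.List.pyGetD_natCast, List.getD_eq_getElem _ _ hm']
  simp [pvIjs, PySem.List.pyGetD_ofNat']

lemma pv_pairs_at (l : List Int) (s : Int) (k : Nat) (hk : k < (pvP l s).length) :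
    PySem.List.pyGetD (pvPairs l s) (k : Int) [] = (pvPairs l s)[k]'(by simpa [pvPairs] using hk) := by
  have hk' : k < (pvPairs l s).length := by simpa [pvPairs] using hk
  rw [PySem.List.pyGetD_natCast, List.getD_eq_getElem _ _ hk']

lemma pv_sel (l : List Int) (s : Int) :
    ∀ (ks : List Int) (a : List Int) (ma : Nat) (hma : ma < (pvP l s).length),
      PySem.List.index? (pvPairs l s) a = some ma →
      (∀ k ∈ ks, 0 ≤ k ∧ k < ((pvP l s).length : Int)) →
      ∃ mr, ∃ hmr : mr < (pvP l s).length,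
        PySem.List.index? (pvPairs l s) (ks.foldl (pvStep l s) a) = some mr ∧
        ((pvP l s)[mr]).2 ≤ ((pvP l s)[ma]).2 ∧
        (∀ (k : Nat) (hk : k < (pvP l s).length), ((k : Int)) ∈ ks →
          ((pvP l s)[mr]).2 ≤ ((pvP l s)[k]).2) := by
  intro ks
  induction ks with
  | nil =>
    intro a ma hma hidx _
    exact ⟨ma, hma, hidx, le_refl _, fun k hk hkmem => absurd hkmem (by simp)⟩
  | cons k0 ks ih =>
    intro a ma hma hidx hbound
    obtain ⟨hk00, hk0len⟩ := hbound k0 (by simp)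
    have hk0 : k0 = ((k0.toNat : Nat) : Int) := by omega
    have hknlen : k0.toNat < (pvP l s).length := by omega
    have hstep : pvStep l s a k0 =
        if ((pvP l s)[k0.toNat]).2 < ((pvP l s)[ma]).2 then
          (pvPairs l s)[k0.toNat]'(by simpa [pvPairs] using hknlen) else a := by
      unfold pvStep
      rw [hidx]
      simp only [Option.getD_some]
      conv_lhs => rw [hk0]
      simp only [pv_ijs_at l s k0.toNat hknlen, pv_ijs_at l s ma hma,
        pv_pairs_at l s k0.toNat hknlen]
    rw [List.foldl_cons, hstep]
    by_cases hcond : ((pvP l s)[k0.toNat]).2 < ((pvP l s)[ma]).2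
    · rw [if_pos hcond]
      obtain ⟨m', hm', hidx', hle'⟩ := pv_index_le l s k0.toNat hknlen
      obtain ⟨mr, hmr, hidxr, hler, hcov⟩ := ih _ m' hm' hidx'
        (fun k hk => hbound k (List.mem_cons_of_mem _ hk))
      refine ⟨mr, hmr, hidxr, le_trans (le_trans hler hle') (le_of_lt hcond), ?_⟩
      intro k hk hkmem
      rcases List.mem_cons.mp hkmem with hkk | hkk
      · have : k = k0.toNat := by omega
        subst this
        exact le_trans hler hle'
      · exact hcov k hk hkk
    · rw [if_neg hcond]
      obtain ⟨mr, hmr, hidxr, hler, hcov⟩ := ih a ma hma hidx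
        (fun k hk => hbound k (List.mem_cons_of_mem _ hk))
      refine ⟨mr, hmr, hidxr, hler, ?_⟩
      intro k hk hkmem
      rcases List.mem_cons.mp hkmem with hkk | hkk
      · have : k = k0.toNat := by omega
        subst this
        exact le_trans hler (not_lt.mp hcond)
      · exact hcov k hk hkk

lemma pv_go_scan (s : Int) :
    ∀ (r : List Int) (seen : PySem.Set Int) (pre : List Int),
      (∀ v, v ∈ seen ↔ v ∈ pre) → sum_pairs_go s r seen = pvScan s r pre := by
  intro r
  induction r with
  | nil => intro seen pre _; rfl
  | cons x r ih =>
    intro seen pre h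
    simp only [sum_pairs_go, pvScan]
    by_cases hx : s - x ∈ pre
    · rw [if_pos ((PySem.Set.contains_iff _ _).mpr ((h _).mpr hx)), if_pos hx]
    · rw [if_neg (fun hc => hx ((h _).mp ((PySem.Set.contains_iff _ _).mp hc))), if_neg hx]
      exact ih _ _ (fun v => by
        rw [PySem.Set.mem_add, List.mem_append, h v]
        simp)

lemma pvScan_none (s : Int) :
    ∀ (r pre : List Int), (∀ (t : Nat) (ht : t < r.length), s - r[t] ∉ pre ++ r.take t) →
      pvScan s r pre = none := by
  intro r
  induction r with
  | nil => intro pre _; rfl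
  | cons x r ih =>
    intro pre h
    have h0 : s - x ∉ pre := by simpa using h 0 (by simp)
    rw [pvScan, if_neg h0]
    apply ih
    intro t ht
    have := h (t + 1) (by simpa using ht)
    simpa [List.append_assoc] using this

lemma pvScan_some (s : Int) :
    ∀ (r pre : List Int) (T : Nat) (hT : T < r.length),
      (∀ (t : Nat) (ht : t < T), s - r[t]'(by omega) ∉ pre ++ r.take t) →
      s - r[T] ∈ pre ++ r.take T →
      pvScan s r pre = some [s - r[T], r[T]] := by
  intro r
  induction r with
  | nil => intro pre T hT; exact absurd hT (by simp)
  | cons x r ih =>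
    intro pre T hT hmin hmem
    cases T with
    | zero =>
      simp only [List.getElem_cons_zero, List.take_zero, List.append_nil] at hmem
      rw [pvScan, if_pos hmem]
      simp
    | succ T =>
      have h0 : s - x ∉ pre := by simpa using hmin 0 (by omega)
      rw [pvScan, if_neg h0]
      have := ih (pre ++ [x]) T (by simpa using hT)
        (fun t ht => by
          have := hmin (t + 1) (by omega)
          simpa [List.append_assoc] using this)
        (by simpa [List.append_assoc] using hmem)
      simpa using this

lemma pv_take_mem (l : List Int) (t : Nat) (ht : t < l.length) (x : Int)
    (hx : x ∈ l.take t) : ∃ i, ∃ _ : i < t, ∃ _ : i < l.length, l[i] = x := by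
  obtain ⟨i, hi, hiv⟩ := List.getElem_of_mem hx
  have hi2 : i < t ∧ i < l.length := by
    simp only [List.length_take] at hi
    omega
  exact ⟨i, hi2.1, hi2.2, by rw [← List.getElem_take]; exact hiv⟩

lemma pv_main_char (l : List Int) (s : Int) : sum_pairs_main l s = pvScan s l [] := by
  simp only [sum_pairs_main]
  rw [pv_st l s]
  by_cases hP : pvP l s = []
  · have hpairs : pvPairs l s = [] := by simp [pvPairs, hP]
    rw [hpairs]
    simp only [ne_eq, not_true_eq_false, if_false]
    symm
    apply pvScan_none
    intro t ht hmem
    simp only [List.nil_append] at hmem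
    obtain ⟨i, hit, hil, hiv⟩ := pv_take_mem l t ht _ hmem
    have : ((i : Int), (t : Int)) ∈ pvP l s := by
      rw [pv_mem']
      refine ⟨by positivity, by omega, by exact_mod_cast ht, ?_⟩
      rw [PySem.List.pyGetD_ofNat l i 0 hil, PySem.List.pyGetD_ofNat l t 0 ht, hiv]
      omega
    rw [hP] at this
    simp at this
  · have hpne : pvPairs l s ≠ [] := by
      simp only [pvPairs, ne_eq, List.map_eq_nil_iff]
      exact hP
    rw [if_pos hpne]
    have h0len : 0 < (pvP l s).length := List.length_pos_iff.mpr hP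
    have h0len' : 0 < (pvPairs l s).length := by simpa [pvPairs] using h0len
    have ha0 : PySem.List.pyGetD (pvPairs l s) 0 [] = (pvPairs l s)[0]'h0len' := by
      rw [PySem.List.pyGetD_ofNat' (pvPairs l s) 0, List.getD_eq_getElem _ _ h0len']
    rw [ha0]
    obtain ⟨m0, hm0, hidx0, _⟩ := pv_index_le l s 0 h0len
    show some (List.foldl (pvStep l s) ((pvPairs l s)[0]'h0len')
      (PySem.List.pyRange 0 ((pvPairs l s).length : Int))) = pvScan s l []
    obtain ⟨mr, hmr, hidxr, _, hcov⟩ := pv_sel l s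
      (PySem.List.pyRange 0 ((pvPairs l s).length : Int)) ((pvPairs l s)[0]'h0len') m0 hm0 hidx0
      (fun k hk => by
        rw [PySem.List.mem_pyRange_one] at hk
        refine ⟨hk.1, ?_⟩
        have := hk.2
        simpa [pvPairs] using this)
    obtain ⟨hmr', hrval, _⟩ := PySem.List.getElem_of_index?_eq_some hidxr
    rw [← hrval]
    obtain ⟨hi0, hij, hjN, hsum⟩ := (pv_mem l s _).mp (List.getElem_mem hmr)
    have hjm0 : 0 ≤ ((pvP l s)[mr]).2 := by omega
    have hT : ((pvP l s)[mr]).2.toNat < l.length := by omega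
    have hI : ((pvP l s)[mr]).1.toNat < l.length := by omega
    have hgj : PySem.List.pyGetD l ((pvP l s)[mr]).2 0 = l[((pvP l s)[mr]).2.toNat]'hT :=
      PySem.List.pyGetD_eq_getElem l 0 hjm0 (by exact_mod_cast hjN)
    have hgi : PySem.List.pyGetD l ((pvP l s)[mr]).1 0 = l[((pvP l s)[mr]).1.toNat]'hI :=
      PySem.List.pyGetD_eq_getElem l 0 hi0 (by omega)
    have hscan : pvScan s l [] =
        some [s - l[((pvP l s)[mr]).2.toNat]'hT, l[((pvP l s)[mr]).2.toNat]'hT] := by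
      apply pvScan_some s l [] ((pvP l s)[mr]).2.toNat hT
      · intro t htT hmem2
        simp only [List.nil_append] at hmem2
        obtain ⟨i, hit, hil, hiv⟩ := pv_take_mem l t (by omega) _ hmem2
        have hmemP : ((i : Int), (t : Int)) ∈ pvP l s := by
          rw [pv_mem']
          refine ⟨by positivity, by omega, by omega, ?_⟩
          rw [PySem.List.pyGetD_ofNat l i 0 hil, PySem.List.pyGetD_ofNat l t 0 (by omega), hiv]
          omega
        obtain ⟨kq, hkq, hkqv⟩ := List.getElem_of_mem hmemP
        have hcovk := hcov kq hkq (by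
          rw [PySem.List.mem_pyRange_one]
          constructor
          · positivity
          · simp only [pvPairs, List.length_map]
            exact_mod_cast hkq)
        rw [hkqv] at hcovk
        simp only [] at hcovk
        omega
      · simp only [List.nil_append]
        have hiT : ((pvP l s)[mr]).1.toNat < ((pvP l s)[mr]).2.toNat := by omega
        have hlen2 : ((pvP l s)[mr]).1.toNat < (l.take ((pvP l s)[mr]).2.toNat).length := by
          simp only [List.length_take]
          omega
        have : (l.take ((pvP l s)[mr]).2.toNat)[((pvP l s)[mr]).1.toNat]'hlen2
            = l[((pvP l s)[mr]).1.toNat]'hI := List.getElem_take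
        have hval : l[((pvP l s)[mr]).1.toNat]'hI
            = s - l[((pvP l s)[mr]).2.toNat]'hT := by
          rw [hgi, hgj] at hsum
          omega
        rw [← hval, ← this]
        exact List.getElem_mem _
    rw [hscan]
    rw [pv_pairs_getElem l s mr hmr]
    rw [hgi, hgj]
    have hval : l[((pvP l s)[mr]).1.toNat]'hI = s - l[((pvP l s)[mr]).2.toNat]'hT := by
      rw [hgi, hgj] at hsum
      omega
    rw [hval]

lemma pv_keep2_eq :
    ∀ (r acc : List Int),
      r.foldl (fun acc x => if PySem.List.count acc x < 2 then acc ++ [x] else acc) acc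
        = acc ++ pvKeepRest acc r := by
  intro r
  induction r with
  | nil => intro acc; simp [pvKeepRest]
  | cons x r ih =>
    intro acc
    simp only [List.foldl_cons, pvKeepRest]
    by_cases h : PySem.List.count acc x < 2
    · rw [if_pos h, if_pos h, ih (acc ++ [x])]
      simp
    · rw [if_neg h, if_neg h, ih acc]

lemma pvScan_congr (s : Int) :
    ∀ (r pre pre' : List Int), (∀ v : Int, v ∈ pre ↔ v ∈ pre') →
      pvScan s r pre = pvScan s r pre' := by
  intro r
  induction r with
  | nil => intro pre pre' _; rfl
  | cons x r ih =>
    intro pre pre' h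
    simp only [pvScan]
    by_cases hx : s - x ∈ pre
    · rw [if_pos hx, if_pos ((h _).mp hx)]
    · rw [if_neg hx, if_neg (fun hc => hx ((h _).mpr hc))]
      exact ih _ _ (fun v => by rw [List.mem_append, List.mem_append, h v])

lemma pv_nopair_snoc (s : Int) (acc : List Int) (x : Int)
    (h : pvNoPair s acc) (hx : (s - x) ∉ acc) : pvNoPair s (acc ++ [x]) := by
  intro v hv hsv
  rcases List.mem_append.mp hv with hva | hvx
  · rcases List.mem_append.mp hsv with hsa | hsx
    · obtain ⟨he, hc⟩ := h v hva hsa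
      have hne : v ≠ x := by
        rintro rfl
        exact hx hsa
      refine ⟨he, ?_⟩
      rw [List.count_append]
      have h0 : List.count v [x] = 0 := List.count_eq_zero.mpr (by simp [hne])
      omega
    · have : s - v = x := by simpa using hsx
      exact absurd (by rw [show s - x = v by omega]; exact hva) hx
  · have hvx' : v = x := by simpa using hvx
    subst hvx'
    rcases List.mem_append.mp hsv with hsa | hsx
    · exact absurd hsa hx
    · have he : s - v = v := by simpa using hsx
      have hnm : v ∉ acc := fun hm => hx (by rw [he]; exact hm)
      refine ⟨he, ?_⟩
      rw [List.count_append]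
      have h1 : List.count v [v] = 1 := by simp
      have h0 : acc.count v = 0 := List.count_eq_zero.mpr hnm
      omega

lemma pv_skip (s : Int) :
    ∀ (r acc : List Int), pvNoPair s acc → pvScan s r acc = pvScan s (pvKeepRest acc r) acc := by
  intro r
  induction r with
  | nil => intro acc _; rfl
  | cons x r ih =>
    intro acc h
    rw [pvKeepRest]
    by_cases hc : PySem.List.count acc x < 2
    · rw [if_pos hc]
      simp only [pvScan]
      by_cases hm : s - x ∈ acc
      · rw [if_pos hm, if_pos hm]
      · rw [if_neg hm, if_neg hm]
        exact ih (acc ++ [x]) (pv_nopair_snoc s acc x h hm)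
    · rw [if_neg hc]
      have hcnt : 2 ≤ acc.count x := by
        have := not_lt.mp hc
        rwa [PySem.List.count_eq] at this
      have hxmem : x ∈ acc := List.count_pos_iff.mp (by omega)
      have hnm : s - x ∉ acc := by
        intro hm
        obtain ⟨_, hc1⟩ := h x hxmem hm
        omega
      rw [pvScan, if_neg hnm]
      calc pvScan s r (acc ++ [x])
          = pvScan s r acc := pvScan_congr s r _ _ (fun v => by
            rw [List.mem_append]
            constructor
            · rintro (hv | hv)
              · exact hv
              · have hvx : v = x := by simpa using hv
                exact hvx ▸ hxmem
            · exact Or.inl)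
        _ = pvScan s (pvKeepRest acc r) acc := ih acc h

-- ===== VERDICT (by name: the statement is the Claim_ definition above) =====
theorem sum_pairs_spec : Claim_equal_sum_pairs := by
  intro ints s _
  unfold Spec_sum_pairs
  have h1 : sum_pairs ints s = pvScan s (sum_pairs_keep2 ints) [] := by
    rw [sum_pairs, pv_main_char]
  have h2 : sum_pairs_keep2 ints = pvKeepRest [] ints := by
    rw [sum_pairs_keep2]
    simpa only [List.nil_append] using pv_keep2_eq ints []
  have h3 : pvScan s (pvKeepRest [] ints) [] = pvScan s ints [] :=
    (pv_skip s ints [] (by intro v hv; simp at hv)).symm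
  have h4 : sum_pairs_alt ints s = pvScan s ints [] :=
    pv_go_scan s ints PySem.Set.empty [] (by intro v; simp [PySem.Set.empty])
  rw [h1, h2, h3, h4]
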